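-- pv_equiv track=rewrite | github.com/LorenzoVenturi/Sports-Tournament-Scheduling-Problem | source/SMT/smt_docker_utils.py | convert_schedule_to_periods
-- ===== SOURCE A (Python) =====
-- def convert_schedule_to_periods(n, schedule):
--     """Convert week-based schedule to period-based format for consistency"""
--     P = n // 2  # Number of periods
--
--     periods = [[] for _ in range(P)]
--
--     for week_idx, week_data in enumerate(schedule["weeks"]):
--         for match in week_data:
--             # Convert 0-indexed to 1-indexed for consistency with other solvers
--             home_team = match["home_team"] + 1
--             away_team = match["away_team"] + 1
--             period = match["period"]
--
--             periods[period].append([home_team, away_team])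
--
--     return periods
-- ===== SOURCE B (Python) =====
-- def convert_schedule_to_periods(n, schedule):
--     """Convert week-based schedule to period-based format for consistency"""
--     P = n // 2  # Number of periods
--     weeks = schedule["weeks"]
--     # Build each period directly: one filtering pass over all matches per period.
--     return [
--         [[m["home_team"] + 1, m["away_team"] + 1]
--          for week in weeks
--          for m in week
--          if m["period"] == p]
--         for p in range(P)
--     ]
-- ===== Notes on version B (the rewrite author's own statement) =====
-- stated objective: alternative
-- what changed: Replaces the scatter pass (preallocate P lists, append each match into periods[match['period']]) by a gather: each of the P period lists is built directly by filtering the match stream for that period index.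
-- intended difference: On schedules containing a match with a negative 'period' in [-P,0), A's Python negative list indexing silently scatters that match into period P+period, while B drops it; a negative period is not a valid period index, so not placing it in an unrelated period is the intended behaviour. — e.g. on convert_schedule_to_periods(4, [("weeks", [[[("home_team", 0), ("away_team", 1), ("period", -1)]]])]): A returns [[], [[1, 2]]], B returns [[], []]
import Mathlib
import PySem

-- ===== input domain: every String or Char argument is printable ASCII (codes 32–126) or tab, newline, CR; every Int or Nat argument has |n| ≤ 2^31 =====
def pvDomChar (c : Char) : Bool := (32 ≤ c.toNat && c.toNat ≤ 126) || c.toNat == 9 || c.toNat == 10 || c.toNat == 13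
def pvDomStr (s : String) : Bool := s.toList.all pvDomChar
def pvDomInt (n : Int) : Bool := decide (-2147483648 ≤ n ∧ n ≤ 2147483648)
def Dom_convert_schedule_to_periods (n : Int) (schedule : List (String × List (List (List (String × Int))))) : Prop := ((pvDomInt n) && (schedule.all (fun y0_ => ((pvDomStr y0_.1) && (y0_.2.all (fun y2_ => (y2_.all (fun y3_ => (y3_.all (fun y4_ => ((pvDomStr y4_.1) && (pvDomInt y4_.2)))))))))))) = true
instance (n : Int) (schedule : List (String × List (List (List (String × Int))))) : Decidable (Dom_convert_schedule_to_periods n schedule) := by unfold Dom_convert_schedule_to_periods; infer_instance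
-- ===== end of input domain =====

-- B gathers each period by filtering the match stream instead of scattering into preallocated lists;
-- B drops matches with a negative 'period' where A's negative indexing wraps them (see D_ below).

-- Python dict lookup on an association list: first matching key.
def pvLookup {α : Type} (l : List (String × α)) (k : String) : Option α :=
  (l.find? (fun p => p.1 == k)).map (·.2)

-- ===== PORT A =====
def convert_schedule_to_periods (n : Int) (schedule : List (String × List (List (List (String × Int))))) : List (List (List Int)) :=
  let P := PySem.Int.floordiv n 2
  let periods : List (List (List Int)) := (PySem.List.pyRange 0 P 1).map (fun _ => [])
  let weeks := (pvLookup schedule "weeks").getD []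
  weeks.foldl (fun periods week_data =>
    week_data.foldl (fun periods m =>
      let home_team := (pvLookup m "home_team").getD 0 + 1
      let away_team := (pvLookup m "away_team").getD 0 + 1
      let period := (pvLookup m "period").getD 0
      -- periods[period].append([home_team, away_team])  (Python negative index wraps; out of range is excluded by Pre_)
      PySem.List.pySetD periods period
        (((PySem.List.pyGet? periods period).getD []) ++ [[home_team, away_team]])) periods) periods

-- ===== PORT B =====
def convert_schedule_to_periods_alt (n : Int) (schedule : List (String × List (List (List (String × Int))))) : List (List (List Int)) :=
  let P := PySem.Int.floordiv n 2
  let weeks := (pvLookup schedule "weeks").getD []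
  (PySem.List.pyRange 0 P 1).map (fun p =>
    weeks.flatMap (fun week => week.filterMap (fun m =>
      if (pvLookup m "period").getD 0 == p then
        some [(pvLookup m "home_team").getD 0 + 1, (pvLookup m "away_team").getD 0 + 1]
      else none)))

-- ===== PRECONDITION & SPEC =====
-- Pre_ = exactly the inputs where A's Python returns: the "weeks" key exists, every match has its
-- three keys, and every 'period' is an in-range list index for the P preallocated lists (-P ≤ period < P).
def Pre_convert_schedule_to_periods (n : Int) (schedule : List (String × List (List (List (String × Int))))) : Prop :=
  (schedule.lookup "weeks").isSome = true ∧
  ∀ week ∈ (schedule.lookup "weeks").getD [], ∀ m ∈ week,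
    (m.lookup "home_team").isSome = true ∧ (m.lookup "away_team").isSome = true ∧
    (m.lookup "period").isSome = true ∧
    -(PySem.Int.floordiv n 2) ≤ (m.lookup "period").getD 0 ∧
    (m.lookup "period").getD 0 < PySem.Int.floordiv n 2
instance (n : Int) (schedule : List (String × List (List (List (String × Int))))) : Decidable (Pre_convert_schedule_to_periods n schedule) := by unfold Pre_convert_schedule_to_periods; infer_instance

def pvWitness_convert_schedule_to_periods : Int × (List (String × List (List (List (String × Int))))) :=
  (4, [("weeks", [[[("home_team", 0), ("away_team", 1), ("period", 0)]]])])

-- On schedules containing a match with a negative 'period' (in [-P,0), so A still returns), A's Python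
-- negative list indexing silently scatters that match into period P+period, while B drops it; a negative
-- period is not a valid period index, so not placing the match in an unrelated period is intended.
def D_convert_schedule_to_periods (n : Int) (schedule : List (String × List (List (List (String × Int))))) : Prop :=
  ∃ week ∈ (schedule.lookup "weeks").getD [], ∃ m ∈ week, (m.lookup "period").getD 0 < 0
instance (n : Int) (schedule : List (String × List (List (List (String × Int))))) : Decidable (D_convert_schedule_to_periods n schedule) := by unfold D_convert_schedule_to_periods; infer_instance

def Spec_convert_schedule_to_periods (n : Int) (schedule : List (String × List (List (List (String × Int))))) (out : List (List (List Int))) : Prop := ¬ D_convert_schedule_to_periods n schedule → out = convert_schedule_to_periods_alt n schedule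
instance (n : Int) (schedule : List (String × List (List (List (String × Int))))) (out : List (List (List Int))) : Decidable (Spec_convert_schedule_to_periods n schedule out) := by unfold Spec_convert_schedule_to_periods; infer_instance

def pvDiffWitness_convert_schedule_to_periods : Int × (List (String × List (List (List (String × Int))))) :=
  (4, [("weeks", [[[("home_team", 0), ("away_team", 1), ("period", -1)]]])])
def pvDiffWitnessOut_convert_schedule_to_periods : (List (List (List Int))) × (List (List (List Int))) :=
  ([[], [[1, 2]]], [[], []])

-- ===== CLAIM (what is proved, stated in full; the proofs are below) =====
def Claim_unchanged_convert_schedule_to_periods : Prop := ∀ (n : Int) (schedule : List (String × List (List (List (String × Int))))), Dom_convert_schedule_to_periods n schedule → Pre_convert_schedule_to_periods n schedule → Spec_convert_schedule_to_periods n schedule (convert_schedule_to_periods n schedule)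
def Claim_changed_convert_schedule_to_periods : Prop := Dom_convert_schedule_to_periods (pvDiffWitness_convert_schedule_to_periods.1) (pvDiffWitness_convert_schedule_to_periods.2) ∧ Pre_convert_schedule_to_periods (pvDiffWitness_convert_schedule_to_periods.1) (pvDiffWitness_convert_schedule_to_periods.2) ∧ D_convert_schedule_to_periods (pvDiffWitness_convert_schedule_to_periods.1) (pvDiffWitness_convert_schedule_to_periods.2) ∧ convert_schedule_to_periods (pvDiffWitness_convert_schedule_to_periods.1) (pvDiffWitness_convert_schedule_to_periods.2) = pvDiffWitnessOut_convert_schedule_to_periods.1 ∧ convert_schedule_to_periods_alt (pvDiffWitness_convert_schedule_to_periods.1) (pvDiffWitness_convert_schedule_to_periods.2) = pvDiffWitnessOut_convert_schedule_to_periods.2 ∧ pvDiffWitnessOut_convert_schedule_to_periods.1 ≠ pvDiffWitnessOut_convert_schedule_to_periods.2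
def Claim_exact_convert_schedule_to_periods : Prop := ∀ (n : Int) (schedule : List (String × List (List (List (String × Int))))), Dom_convert_schedule_to_periods n schedule → Pre_convert_schedule_to_periods n schedule → D_convert_schedule_to_periods n schedule → convert_schedule_to_periods n schedule ≠ convert_schedule_to_periods_alt n schedule

-- ===== LEMMAS AND PROOFS =====

-- pvLookup is List.lookup with the arguments flipped.
lemma pvLookup_eq {α : Type} (l : List (String × α)) (k : String) :
    pvLookup l k = l.lookup k := by
  induction l with
  | nil => rfl
  | cons q l ih =>
    by_cases h : q.1 = k
    · simp [pvLookup, List.lookup, h]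
    · have h2 : (k == q.1) = false := beq_eq_false_iff_ne.mpr (fun he => h he.symm)
      simpa [pvLookup, List.lookup, h, h2] using ih

-- A's inner loop body, named for the proofs.
def pvPd (m : List (String × Int)) : Int := (pvLookup m "period").getD 0
def pvPair (m : List (String × Int)) : List Int :=
  [(pvLookup m "home_team").getD 0 + 1, (pvLookup m "away_team").getD 0 + 1]
def pvStep (acc : List (List (List Int))) (m : List (String × Int)) : List (List (List Int)) :=
  PySem.List.pySetD acc (pvPd m) (((PySem.List.pyGet? acc (pvPd m)).getD []) ++ [pvPair m])

def pvGather (p : Int) (ms : List (List (String × Int))) : List (List Int) :=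
  ms.filterMap (fun m => if pvPd m == p then some (pvPair m) else none)

lemma pvStep_in_range (acc : List (List (List Int))) (m : List (String × Int))
    (h0 : 0 ≤ pvPd m) (h1 : pvPd m < (acc.length : Int)) :
    pvStep acc m = acc.set (pvPd m).toNat (acc[(pvPd m).toNat]'(by omega) ++ [pvPair m]) := by
  rw [pvStep, PySem.List.pySetD_of_nonneg _ _ h0,
      PySem.List.pyGet?_eq_some_getElem _ h0 h1, Option.getD_some]

lemma pvScatter_eq (ms : List (List (String × Int))) (acc : List (List (List Int)))
    (h : ∀ m ∈ ms, 0 ≤ pvPd m ∧ pvPd m < (acc.length : Int)) :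
    ms.foldl pvStep acc = acc.mapIdx (fun j l => l ++ pvGather (j : Int) ms) := by
  induction ms generalizing acc with
  | nil =>
    apply List.ext_getElem <;> simp [pvGather]
  | cons m ms ih =>
    have hm := h m (List.mem_cons_self)
    have hms : ∀ m' ∈ ms, 0 ≤ pvPd m' ∧ pvPd m' < ((acc.set (pvPd m).toNat
        (acc[(pvPd m).toNat]'(by omega) ++ [pvPair m])).length : Int) := by
      intro m' hm'
      simpa using h m' (List.mem_cons_of_mem _ hm')
    rw [List.foldl_cons, pvStep_in_range acc m hm.1 hm.2, ih _ hms]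
    apply List.ext_getElem
    · simp
    · intro j hj1 hj2
      simp only [List.getElem_mapIdx, List.getElem_set, pvGather, List.filterMap_cons]
      by_cases hji : j = (pvPd m).toNat
      · have hpd : pvPd m == (j : Int) := by
          simp only [beq_iff_eq]; omega
        subst hji
        simp [hm.1]
      · have hpd : (pvPd m == (j : Int)) = false := by
          simp only [beq_eq_false_iff_ne, ne_eq]; omega
        simp [hpd, if_neg (Ne.symm hji)]

-- B's per-week filterMap over the flattened match list.
lemma pvFlatMap_filterMap {α β : Type} (L : List (List α)) (f : α → Option β) :
    L.flatMap (fun l => l.filterMap f) = L.flatten.filterMap f := by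
  simp [List.filterMap_flatten, List.flatMap_def]

theorem convert_schedule_to_periods_spec : Claim_unchanged_convert_schedule_to_periods := by
  intro n schedule _ hpre hnd
  obtain ⟨_, hpre⟩ := hpre
  unfold D_convert_schedule_to_periods at hnd
  push Not at hnd
  simp only [← pvLookup_eq] at hpre hnd
  show convert_schedule_to_periods n schedule = convert_schedule_to_periods_alt n schedule
  rw [convert_schedule_to_periods, convert_schedule_to_periods_alt]
  set P := PySem.Int.floordiv n 2 with hP
  set weeks := (pvLookup schedule "weeks").getD [] with hw
  have hbound : ∀ m ∈ weeks.flatten, 0 ≤ pvPd m ∧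
      pvPd m < (((PySem.List.pyRange 0 P 1).map
        (fun _ => ([] : List (List Int)))).length : Int) := by
    intro m hm
    obtain ⟨week, hwk, hm⟩ := List.mem_flatten.mp hm
    have h1 := (hpre week hwk m hm).2.2.2
    have h2 := hnd week hwk m hm
    have h3 : ((PySem.List.pyRange 0 P 1).map
        (fun _ => ([] : List (List Int)))).length = P.toNat := by
      simp [PySem.List.length_pyRange_one]
    rw [h3]
    unfold pvPd
    constructor
    · omega
    · have := h1.2
      unfold pvPd at *
      omega
  change List.foldl (fun periods week_data => List.foldl pvStep periods week_data)
      ((PySem.List.pyRange 0 P 1).map (fun _ => [])) weeks = _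
  rw [← List.foldl_flatten, pvScatter_eq _ _ hbound]
  apply List.ext_getElem
  · simp
  · intro j hj1 hj2
    rw [List.getElem_mapIdx]
    simp only [List.getElem_map, PySem.List.getElem_pyRange_one, zero_add]
    rw [pvFlatMap_filterMap]
    simp [pvGather, pvPd, pvPair]

-- ----- tightness: inside D_ the two results always differ (their total numbers of matches differ) -----

def pvTotal (out : List (List (List Int))) : Nat := (out.map List.length).sum

lemma pvTotal_set (xs : List (List (List Int))) (k : Nat) (v : List Int) (hk : k < xs.length) :
    pvTotal (xs.set k (xs[k] ++ [v])) = pvTotal xs + 1 := by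
  induction xs generalizing k with
  | nil => simp at hk
  | cons x xs ih =>
    cases k with
    | zero => simp [pvTotal]; omega
    | succ k =>
      have hk' : k < xs.length := by simpa using hk
      simp only [List.set_cons_succ, List.getElem_cons_succ, pvTotal, List.map_cons, List.sum_cons]
      rw [show ((xs.set k (xs[k] ++ [v])).map List.length).sum = pvTotal (xs.set k (xs[k] ++ [v])) from rfl,
          ih k hk']
      rfl

lemma pvStep_in_range_neg (acc : List (List (List Int))) (m : List (String × Int))
    (h0 : -(acc.length : Int) ≤ pvPd m) (h1 : pvPd m < 0) :
    pvStep acc m = acc.set (pvPd m + acc.length).toNat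
      (acc[(pvPd m + acc.length).toNat]'(by omega) ++ [pvPair m]) := by
  have hn : ¬ (0 ≤ pvPd m) := by omega
  simp only [pvStep, PySem.List.pySetD, PySem.List.pySet?, PySem.List.pyGet?, PySem.List.pyIdx?,
    if_neg hn, if_pos h0]
  have hkk : acc.length - (-(pvPd m)).toNat = (pvPd m + acc.length).toNat := by omega
  rw [hkk]
  simp [List.getElem?_eq_getElem (show (pvPd m + (acc.length : Int)).toNat < acc.length from by omega)]

lemma pvStep_total (acc : List (List (List Int))) (m : List (String × Int))
    (h : PySem.Raise.InRange acc.length (pvPd m)) :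
    pvTotal (pvStep acc m) = pvTotal acc + 1 := by
  obtain ⟨h0, h1⟩ := h
  by_cases hs : 0 ≤ pvPd m
  · rw [pvStep_in_range acc m hs h1]
    exact pvTotal_set acc (pvPd m).toNat (pvPair m) (by omega)
  · rw [pvStep_in_range_neg acc m h0 (by omega)]
    exact pvTotal_set acc (pvPd m + acc.length).toNat (pvPair m) (by omega)

lemma pvStep_length (acc : List (List (List Int))) (m : List (String × Int))
    (h : PySem.Raise.InRange acc.length (pvPd m)) :
    (pvStep acc m).length = acc.length := by
  obtain ⟨h0, h1⟩ := h
  by_cases hs : 0 ≤ pvPd m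
  · rw [pvStep_in_range acc m hs h1]; simp
  · rw [pvStep_in_range_neg acc m h0 (by omega)]; simp

lemma pvScatter_total (ms : List (List (String × Int))) (acc : List (List (List Int)))
    (h : ∀ m ∈ ms, PySem.Raise.InRange acc.length (pvPd m)) :
    pvTotal (ms.foldl pvStep acc) = pvTotal acc + ms.length := by
  induction ms generalizing acc with
  | nil => simp
  | cons m ms ih =>
    have hm := h m List.mem_cons_self
    rw [List.foldl_cons,
        ih (pvStep acc m) (by
          intro m' hm'
          rw [pvStep_length acc m hm]
          exact h m' (List.mem_cons_of_mem _ hm')),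
        pvStep_total acc m hm]
    simp [Nat.add_assoc, Nat.add_comm 1 _]

lemma pvSum_ite_count (a : Int) (l : List Int) :
    (l.map (fun x => if a == x then 1 else 0)).sum = l.count a := by
  induction l with
  | nil => rfl
  | cons x l ih =>
    simp only [List.map_cons, List.sum_cons, List.count_cons, ih]
    by_cases h : a = x
    · subst h; simp [Nat.add_comm]
    · simp [h, Ne.symm h]

lemma pvGatherLen_cons (p : Int) (m : List (String × Int)) (ms : List (List (String × Int))) :
    (pvGather p (m :: ms)).length = (if pvPd m == p then 1 else 0) + (pvGather p ms).length := by
  by_cases h : pvPd m = p <;> simp [pvGather, h, Nat.add_comm]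

lemma pvGather_total (P : Int) (ms : List (List (String × Int))) :
    (((PySem.List.pyRange 0 P 1).map (fun p => (pvGather p ms).length)).sum)
      = ms.countP (fun m => decide (0 ≤ pvPd m) && decide (pvPd m < P)) := by
  induction ms with
  | nil => simp [pvGather]
  | cons m ms ih =>
    simp only [pvGatherLen_cons, List.sum_map_add, ih, List.countP_cons]
    have hcnt : ((PySem.List.pyRange 0 P 1).map (fun p => if pvPd m == p then 1 else 0)).sum
        = (if 0 ≤ pvPd m ∧ pvPd m < P then 1 else 0) := by
      rw [pvSum_ite_count]
      by_cases hmem : pvPd m ∈ PySem.List.pyRange 0 P 1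
      · rw [List.count_eq_one_of_mem (PySem.List.nodup_pyRange_one 0 P) hmem,
            if_pos (by simpa using (PySem.List.mem_pyRange_one.mp hmem))]
      · rw [List.count_eq_zero_of_not_mem hmem,
            if_neg (by
              intro hc
              exact hmem (PySem.List.mem_pyRange_one.mpr ⟨by omega, by omega⟩))]
    rw [hcnt]
    by_cases h0 : 0 ≤ pvPd m <;> by_cases h1 : pvPd m < P <;> simp [h0, h1, Nat.add_comm]

-- ===== VERDICT (by name: the statement is the Claim_ definition above) =====
theorem convert_schedule_to_periods_changed : Claim_changed_convert_schedule_to_periods := by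
  unfold Claim_changed_convert_schedule_to_periods; decide

theorem convert_schedule_to_periods_tight : Claim_exact_convert_schedule_to_periods := by
  intro n schedule _ hpre hd heq
  obtain ⟨_, hpre⟩ := hpre
  unfold D_convert_schedule_to_periods at hd
  simp only [← pvLookup_eq] at hpre hd
  obtain ⟨week0, hw0, m0, hm0, hneg⟩ := hd
  set P := PySem.Int.floordiv n 2 with hP
  set weeks := (pvLookup schedule "weeks").getD [] with hw
  set acc0 : List (List (List Int)) := (PySem.List.pyRange 0 P 1).map (fun _ => []) with hacc0
  have hlen0 : acc0.length = P.toNat := by simp [hacc0, PySem.List.length_pyRange_one]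
  have hrange : ∀ m ∈ weeks.flatten, PySem.Raise.InRange acc0.length (pvPd m) := by
    intro m hm
    obtain ⟨week, hwk, hm⟩ := List.mem_flatten.mp hm
    have h1 := (hpre week hwk m hm).2.2.2
    rw [PySem.Raise.InRange, hlen0]
    unfold pvPd at *
    omega
  have hAval : convert_schedule_to_periods n schedule = weeks.flatten.foldl pvStep acc0 := by
    rw [convert_schedule_to_periods]
    change List.foldl (fun periods week_data => List.foldl pvStep periods week_data) acc0 weeks = _
    rw [← List.foldl_flatten]
  have htotA : pvTotal (convert_schedule_to_periods n schedule) = weeks.flatten.length := by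
    rw [hAval, pvScatter_total _ _ hrange]
    have : pvTotal acc0 = 0 := by
      simp [pvTotal, hacc0]
    omega
  have htotB : pvTotal (convert_schedule_to_periods_alt n schedule)
      = weeks.flatten.countP (fun m => decide (0 ≤ pvPd m) && decide (pvPd m < P)) := by
    rw [convert_schedule_to_periods_alt]
    rw [← hP, ← hw, ← pvGather_total P weeks.flatten]
    rw [pvTotal, List.map_map]
    apply congrArg List.sum
    apply List.map_congr_left
    intro p _
    rw [Function.comp_apply, pvFlatMap_filterMap]
    rfl
  have hm0' : m0 ∈ weeks.flatten := List.mem_flatten.mpr ⟨week0, hw0, hm0⟩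
  have hne : weeks.flatten.countP (fun m => decide (0 ≤ pvPd m) && decide (pvPd m < P))
      ≠ weeks.flatten.length := by
    intro hc
    have := List.countP_eq_length.mp hc m0 hm0'
    unfold pvPd at this
    simp at this
    omega
  rw [heq, htotB] at htotA
  exact hne htotA
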